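-- pv_equiv track=rewrite | github.com/RedVoxInc/redvox-python-sdk | reader.py | get_metadata_as_dict
-- ===== SOURCE A (Python) =====
-- import typing
--
-- class ReaderException(Exception):
--     def __init__(self, msg: str = "ReaderException"):
--         super(ReaderException, self).__init__(msg)
--
-- def get_metadata_as_dict(metadata: typing.List[str]) -> typing.Dict[str, str]:
--     """Since the metadata is inherently key-value, it may be useful to turn the metadata list into a python dictionary.
--
--     Args:
--         metadata: The metadata list.
--
--     Returns:
--         Metadata as a python dictionary.
--     """
--
--     if len(metadata) == 0:
--         return {}
--
--     if len(metadata) % 2 != 0: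
--         raise ReaderException("metadata list must contain an even number of items")
--
--     metadata_dict = {}
--     metadata_copy = metadata.copy()
--     while len(metadata_copy) >= 2:
--         k = metadata_copy.pop(0)
--         v = metadata_copy.pop(0)
--         if k not in metadata_dict:
--             metadata_dict[k] = v
--     return metadata_dict
-- ===== SOURCE B (Python) =====
-- import typing
--
--
-- class ReaderException(Exception):
--     def __init__(self, msg: str = "ReaderException"):
--         super(ReaderException, self).__init__(msg)
--
--
-- def get_metadata_as_dict(metadata: typing.List[str]) -> typing.Dict[str, str]:
--     if len(metadata) == 0:
--         return {}
--
--     if len(metadata) % 2 != 0: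
--         raise ReaderException("metadata list must contain an even number of items")
--
--     metadata_dict = {}
--     for k, v in zip(metadata[0::2], metadata[1::2]):
--         metadata_dict.setdefault(k, v)
--     return metadata_dict
-- ===== Notes on version B (the rewrite author's own statement) =====
-- stated objective: faster
-- what changed: Replaces A's destructive while loop (two list.pop(0) calls per pair plus an explicit membership branch) with a single pass over zip of the two strided slices metadata[0::2] and metadata[1::2], using dict.setdefault for the first-key-wins rule.
import Mathlib
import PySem

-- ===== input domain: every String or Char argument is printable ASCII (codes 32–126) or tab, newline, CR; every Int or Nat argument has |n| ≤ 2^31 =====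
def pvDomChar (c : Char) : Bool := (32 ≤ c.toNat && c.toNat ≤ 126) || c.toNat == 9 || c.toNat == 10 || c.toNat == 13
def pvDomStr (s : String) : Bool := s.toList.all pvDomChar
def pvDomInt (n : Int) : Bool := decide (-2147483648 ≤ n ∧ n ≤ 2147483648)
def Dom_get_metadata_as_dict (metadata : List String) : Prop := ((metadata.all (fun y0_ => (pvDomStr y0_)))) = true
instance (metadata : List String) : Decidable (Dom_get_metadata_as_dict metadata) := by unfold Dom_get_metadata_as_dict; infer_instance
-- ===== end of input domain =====

-- B replaces A's destructive pair-popping while loop (quadratic list.pop(0)) with one pass over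
-- zip(metadata[0::2], metadata[1::2]) using dict.setdefault; objective: faster.

-- ===== PORT A =====
-- the while loop: pop two items, insert only if the key is not yet present
def pvGoA : List String → PySem.Dict String String → PySem.Dict String String
  | k :: v :: rest, d => pvGoA rest (if d.contains k then d else d.insert k v)
  | _, d => d

def get_metadata_as_dict (metadata : List String) : List (String × String) :=
  if metadata.length = 0 then []
  else if metadata.length % 2 ≠ 0 then []   -- Python raises ReaderException here; excluded by Pre_
  else (pvGoA metadata PySem.Dict.empty).items

-- ===== PORT B =====
def get_metadata_as_dict_alt (metadata : List String) : List (String × String) :=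
  if metadata.length = 0 then []
  else if metadata.length % 2 ≠ 0 then []   -- Python raises ReaderException here; excluded by Pre_
  else
    -- metadata[0::2] and metadata[1::2]; step 2 ≠ 0, so slice? is always some
    let keys := (PySem.List.slice? metadata (some 0) none 2).getD []
    let values := (PySem.List.slice? metadata (some 1) none 2).getD []
    ((keys.zip values).foldl
        (fun d p => if d.contains p.1 then d else d.insert p.1 p.2)  -- d.setdefault(k, v)
        PySem.Dict.empty).items

-- ===== PRECONDITION & SPEC =====
-- Pre_ excludes exactly the odd-length lists, on which Python A raises ReaderException (B raises too).
def Pre_get_metadata_as_dict (metadata : List String) : Prop := metadata.length % 2 = 0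
instance (metadata : List String) : Decidable (Pre_get_metadata_as_dict metadata) := by
  unfold Pre_get_metadata_as_dict; infer_instance

def pvWitness_get_metadata_as_dict : List String := ["a", "1", "b", "2", "a", "3"]

def Spec_get_metadata_as_dict (metadata : List String) (out : List (String × String)) : Prop :=
  out = get_metadata_as_dict_alt metadata
instance (metadata : List String) (out : List (String × String)) : Decidable (Spec_get_metadata_as_dict metadata out) := by
  unfold Spec_get_metadata_as_dict; infer_instance

-- ===== CLAIM =====
def Claim_equal_get_metadata_as_dict : Prop :=
  ∀ (metadata : List String), Dom_get_metadata_as_dict metadata →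
    Pre_get_metadata_as_dict metadata →
    Spec_get_metadata_as_dict metadata (get_metadata_as_dict metadata)

-- ===== LEMMAS AND PROOFS =====

-- elements at even / odd positions
def pvEvens : List String → List String
  | [] => []
  | [x] => [x]
  | x :: _ :: t => x :: pvEvens t

def pvOdds : List String → List String
  | [] => []
  | [_] => []
  | _ :: y :: t => y :: pvOdds t

-- the disjoint consecutive pairs of a list
def pvPairs : List String → List (String × String)
  | k :: v :: rest => (k, v) :: pvPairs rest
  | _ => []

theorem pvZip_evens_odds : ∀ (l : List String), (pvEvens l).zip (pvOdds l) = pvPairs l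
  | [] => rfl
  | [_] => rfl
  | _ :: _ :: t => by
    simp only [pvEvens, pvOdds, pvPairs, List.zip_cons_cons]
    rw [pvZip_evens_odds t]

theorem pvOdds_cons_eq_evens : ∀ (x : String) (t : List String), pvOdds (x :: t) = pvEvens t
  | _, [] => rfl
  | _, [_] => rfl
  | _, _ :: _ :: t => by
    simp only [pvOdds, pvEvens]
    rw [pvOdds_cons_eq_evens _ t]

theorem pvFilterMap_range_evens : ∀ (l : List String),
    (List.range ((l.length + 1) / 2)).filterMap (fun k => l[2 * k]?) = pvEvens l
  | [] => rfl
  | [x] => by simp [pvEvens, List.range_succ]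
  | x :: y :: t => by
    have hlen : ((x :: y :: t).length + 1) / 2 = (t.length + 1) / 2 + 1 := by
      simp only [List.length_cons]; omega
    rw [hlen, List.range_succ_eq_map, List.filterMap_cons, List.filterMap_map]
    have h0 : (x :: y :: t)[2 * 0]? = some x := rfl
    rw [h0]
    have hf : ((fun k => (x :: y :: t)[2 * k]?) ∘ Nat.succ) = fun k => t[2 * k]? := by
      funext k
      show (x :: y :: t)[2 * (k + 1)]? = t[2 * k]?
      have : 2 * (k + 1) = 2 * k + 1 + 1 := by omega
      rw [this, List.getElem?_cons_succ, List.getElem?_cons_succ]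
    rw [hf, pvFilterMap_range_evens t]
    rfl

theorem pvFilterMap_range_odds (l : List String) :
    (List.range (l.length / 2)).filterMap (fun k => l[2 * k + 1]?) = pvOdds l := by
  cases l with
  | nil => rfl
  | cons x t =>
    have hlen : (x :: t).length / 2 = (t.length + 1) / 2 := by
      simp only [List.length_cons]
    have hf : (fun k => (x :: t)[2 * k + 1]?) = fun k => t[2 * k]? := by
      funext k; rw [List.getElem?_cons_succ]
    rw [hlen, hf, pvFilterMap_range_evens t, pvOdds_cons_eq_evens]
    -- (closes by rfl inside rw)

theorem pvSlice_evens (l : List String) :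
    PySem.List.slice? l (some 0) none 2 = some (pvEvens l) := by
  rw [← pvFilterMap_range_evens l]
  simp only [PySem.List.slice?, PySem.List.sliceIndices]
  norm_num
  have h1 : (if 0 < l.length then (((l.length : Int) + 2 - 1) / 2).toNat else 0)
      = (l.length + 1) / 2 := by
    split_ifs with h
    · omega
    · omega
  rw [h1]
  apply List.filterMap_congr
  intro k hk
  have : ((2 : Int) * (k : Int)).toNat = 2 * k := by omega
  rw [this]

theorem pvSlice_odds (l : List String) :
    PySem.List.slice? l (some 1) none 2 = some (pvOdds l) := by
  rw [← pvFilterMap_range_odds l]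
  simp only [PySem.List.slice?, PySem.List.sliceIndices]
  norm_num
  have h1 : (if 1 < l.length then (((l.length : Int) - min 1 (l.length : Int) + 2 - 1) / 2).toNat else 0)
      = l.length / 2 := by
    split_ifs with h
    · omega
    · omega
  rw [h1]
  apply List.filterMap_congr
  intro k hk
  have : (min 1 (l.length : Int) + 2 * (k : Int)).toNat = 2 * k + 1 := by
    have := List.mem_range.mp hk
    omega
  rw [this]

theorem pvGoA_eq_foldl : ∀ (l : List String) (d : PySem.Dict String String),
    pvGoA l d = (pvPairs l).foldl
      (fun d p => if d.contains p.1 then d else d.insert p.1 p.2) d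
  | [], _ => rfl
  | [_], _ => rfl
  | _ :: _ :: rest, d => by
    simp only [pvGoA, pvPairs, List.foldl_cons]
    exact pvGoA_eq_foldl rest _

-- ===== VERDICT =====
theorem get_metadata_as_dict_spec : Claim_equal_get_metadata_as_dict := by
  intro metadata _ _
  unfold Spec_get_metadata_as_dict get_metadata_as_dict get_metadata_as_dict_alt
  rw [pvSlice_evens, pvSlice_odds]
  simp only [Option.getD_some]
  rw [pvZip_evens_odds, pvGoA_eq_foldl]
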